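-- pv_equiv track=rewrite | github.com/Stonewater-Digital/snowdrop-mcp | skills/trust/web_of_trust_manager.py | _trust_depth
-- ===== SOURCE A (Python) =====
-- from collections import deque
--
-- ROOT_AGENT = "snowdrop-core"
--
-- def _trust_depth(graph: dict[str, set[str]], target: str) -> int:
--     if target == ROOT_AGENT:
--         return 0
--     visited = {ROOT_AGENT}
--     queue: deque[tuple[str, int]] = deque([(ROOT_AGENT, 0)])
--     while queue:
--         current, depth = queue.popleft()
--         for neighbor in graph.get(current, []):
--             if neighbor == target:
--                 return depth + 1
--             if neighbor not in visited:
--                 visited.add(neighbor)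
--                 queue.append((neighbor, depth + 1))
--     return -1
-- ===== SOURCE B (Python) =====
-- ROOT_AGENT = "snowdrop-core"
--
-- def _trust_depth(graph: dict[str, set[str]], target: str) -> int:
--     if target == ROOT_AGENT:
--         return 0
--     reached = {ROOT_AGENT}
--     depth = 0
--     while True:
--         image = set()
--         for node in reached:
--             image.update(graph.get(node, ()))
--         if target in image:
--             return depth + 1
--         if image.issubset(reached):
--             return -1
--         reached |= image
--         depth += 1
-- ===== Notes on version B (the rewrite author's own statement) =====
-- stated objective: alternative
-- what changed: Replaces BFS (deque of (node,depth) pairs plus a visited set) by naive fixed-point iteration of the one-step reachability image: each round recomputes the neighbor image of the whole reached set; the answer is the first round whose image contains the target, and -1 when the image stabilises.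
import Mathlib
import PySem

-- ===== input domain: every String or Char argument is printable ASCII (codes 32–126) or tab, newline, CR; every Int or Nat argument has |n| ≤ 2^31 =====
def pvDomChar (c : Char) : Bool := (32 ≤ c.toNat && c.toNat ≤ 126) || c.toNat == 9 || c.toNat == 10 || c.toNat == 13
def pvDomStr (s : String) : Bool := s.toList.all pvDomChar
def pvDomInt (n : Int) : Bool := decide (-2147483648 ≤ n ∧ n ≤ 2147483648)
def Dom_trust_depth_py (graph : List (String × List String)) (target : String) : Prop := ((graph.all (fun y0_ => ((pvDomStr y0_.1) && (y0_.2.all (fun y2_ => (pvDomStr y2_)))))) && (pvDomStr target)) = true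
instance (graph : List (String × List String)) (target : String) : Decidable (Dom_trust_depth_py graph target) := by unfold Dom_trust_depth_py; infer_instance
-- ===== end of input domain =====

-- B replaces A's BFS (deque of (node, depth) pairs + visited set) by naive fixed-point iteration of the
-- one-step reachability image; same return value (objective: alternative, not faster).
-- Both loops in the ports carry fuel only to be total: A pops at most one enqueued node per step and
-- enqueues are bounded by the total neighbour count; B strictly grows `reached` inside a finite universe.

def pvFuel (graph : List (String × List String)) : Nat :=
  graph.foldl (fun a p => a + p.2.length) 1

-- ===== PORT A =====
-- inner 'for neighbor in graph.get(current, [])' loop of A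
def pvScanA (target : String) (visited : PySem.Set String)
    (queue : List (String × Int)) (depth : Int) :
    List String → Sum Int (PySem.Set String × List (String × Int))
  | [] => Sum.inr (visited, queue)
  | n :: ns =>
      if n = target then Sum.inl (depth + 1)
      else if PySem.Set.contains visited n then pvScanA target visited queue depth ns
      else pvScanA target (PySem.Set.add visited n) (queue ++ [(n, depth + 1)]) depth ns

-- A's 'while queue' loop; fuel is consumed once per popped node
def pvGoA (graph : List (String × List String)) (target : String) :
    Nat → PySem.Set String → List (String × Int) → Int
  | _, _, [] => -1
  | 0, _, _ :: _ => -1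
  | Nat.succ f, visited, (current, depth) :: rest =>
      match pvScanA target visited rest depth (PySem.Dict.getD (PySem.Dict.mk graph) current []) with
      | Sum.inl d => d
      | Sum.inr (v, q) => pvGoA graph target f v q

def trust_depth_py (graph : List (String × List String)) (target : String) : Int :=
  if target = "snowdrop-core" then 0
  else pvGoA graph target (pvFuel graph) (PySem.Set.ofList ["snowdrop-core"])
        [("snowdrop-core", 0)]

-- ===== PORT B =====
-- 'image = set(); for node in reached: image.update(graph.get(node, ()))' — a union, so the
-- unspecified Python set-iteration order cannot affect the result
def pvImage (graph : List (String × List String)) (reached : PySem.Set String) : PySem.Set String :=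
  reached.foldl
    (fun img node => PySem.Set.update img (PySem.Dict.getD (PySem.Dict.mk graph) node []))
    PySem.Set.empty

-- B's 'while True' loop; the fuel argument only makes it total (reached strictly grows per round
-- inside the finite universe of mentioned agents, so pvFuel rounds always suffice)
def pvGoB (graph : List (String × List String)) (target : String) :
    Nat → PySem.Set String → Int → Int
  | 0, _, _ => -1
  | Nat.succ f, reached, depth =>
      let image := pvImage graph reached
      if target ∈ image then depth + 1
      else if PySem.Set.issubset image reached then -1
      else pvGoB graph target f (PySem.Set.union reached image) (depth + 1)

def trust_depth_py_alt (graph : List (String × List String)) (target : String) : Int :=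
  if target = "snowdrop-core" then 0
  else pvGoB graph target (pvFuel graph) (PySem.Set.ofList ["snowdrop-core"]) 0

-- ===== PRECONDITION & SPEC =====
def Spec_trust_depth_py (graph : List (String × List String)) (target : String) (out : Int) : Prop := out = trust_depth_py_alt graph target
instance (graph : List (String × List String)) (target : String) (out : Int) : Decidable (Spec_trust_depth_py graph target out) := by unfold Spec_trust_depth_py; infer_instance

-- ===== CLAIM (what is proved, stated in full; the proofs are below) =====
def Claim_equal_trust_depth_py : Prop := ∀ (graph : List (String × List String)) (target : String), Dom_trust_depth_py graph target → Spec_trust_depth_py graph target (trust_depth_py graph target)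

-- ===== LEMMAS AND PROOFS =====


-- neighbour list of one node, and the finite universe of all mentioned agents (proof-side only)
def pvNbrs (graph : List (String × List String)) (c : String) : List String :=
  PySem.Dict.getD (PySem.Dict.mk graph) c []

def pvUniv (graph : List (String × List String)) : List String :=
  "snowdrop-core" :: graph.flatMap (fun p => p.2)

-- the target-free residue of pvScanA: visited additions and the appended fresh nodes
def pvScanF (V : PySem.Set String) (acc : List String) :
    List String → PySem.Set String × List String
  | [] => (V, acc)
  | n :: ns =>
      if PySem.Set.contains V n then pvScanF V acc ns
      else pvScanF (PySem.Set.add V n) (acc ++ [n]) ns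

-- one whole BFS level of A, as a fold of pvScanF over the frontier
def pvLvl (graph : List (String × List String))
    (st : PySem.Set String × List String) (F : List String) :
    PySem.Set String × List String :=
  F.foldl (fun st c => pvScanF st.1 st.2 (pvNbrs graph c)) st


-- strict countP decrease at a witness
theorem pv_countP_lt {α : Type} (l : List α) (p q : α → Bool)
    (h : ∀ a ∈ l, p a = true → q a = true) (x : α) (hx : x ∈ l)
    (hpx : p x = false) (hqx : q x = true) : l.countP p < l.countP q := by
  induction l with
  | nil => simp at hx
  | cons a l ih =>
      simp only [List.countP_cons]
      rcases List.mem_cons.1 hx with rfl | hx'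
      · have hle : l.countP p ≤ l.countP q :=
          List.countP_mono_left (fun a ha => h a (List.mem_cons_of_mem _ ha))
        simp [hpx, hqx]; omega
      · have := ih (fun a ha hp => h a (List.mem_cons_of_mem _ ha) hp) hx'
        have : l.countP p < l.countP q := this
        by_cases hpa : p a = true
        · have := h a (List.mem_cons_self) hpa
          simp [hpa, this]; omega
        · simp only [Bool.not_eq_true] at hpa
          simp [hpa]; omega


theorem pvNbrs_subset (graph : List (String × List String)) (c x : String)
    (hx : x ∈ pvNbrs graph c) : x ∈ pvUniv graph := by
  unfold pvNbrs at hx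
  rw [PySem.Dict.getD_eq_get?_getD] at hx
  unfold pvUniv
  apply List.mem_cons_of_mem
  induction graph with
  | nil => simp [PySem.Dict.get?] at hx
  | cons p rest ih =>
      rw [show PySem.Dict.mk (p :: rest) = PySem.Dict.mk ((p.1, p.2) :: rest) by rfl,
        PySem.Dict.get?_mk_cons] at hx
      simp only [List.flatMap_cons, List.mem_append]
      by_cases hb : (p.1 == c) = true
      · rw [if_pos hb] at hx; simp at hx; left; simp [hx]
      · rw [if_neg hb] at hx; right; exact ih hx


-- pvFuel is the size of the universe
theorem pvFuel_eq (graph : List (String × List String)) :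
    pvFuel graph = (pvUniv graph).length := by
  unfold pvFuel pvUniv
  simp only [List.length_cons, List.length_flatMap]
  have : ∀ (g : List (String × List String)) (init : Nat),
      g.foldl (fun a p => a + p.2.length) init = init + (g.map (fun p => p.2.length)).sum := by
    intro g; induction g with
    | nil => simp
    | cons p rest ih => intro init; simp [List.foldl_cons, ih]; omega
  rw [this]; omega


-- membership in the image
theorem pvImage_mem (graph : List (String × List String)) (R : PySem.Set String) (x : String) :
    x ∈ pvImage graph R ↔ ∃ y ∈ R, x ∈ pvNbrs graph y := by
  have gen : ∀ (l : List String) (init : PySem.Set String),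
      x ∈ l.foldl (fun img node => PySem.Set.update img (PySem.Dict.getD (PySem.Dict.mk graph) node [])) init ↔
        x ∈ init ∨ ∃ y ∈ l, x ∈ pvNbrs graph y := by
    intro l; induction l with
    | nil => simp
    | cons a l ih =>
        intro init
        simp only [List.foldl_cons, ih, PySem.Set.mem_update, pvNbrs]
        constructor
        · rintro (⟨h | h⟩ | ⟨y, hy, hx⟩)
          · exact Or.inl h
          · exact Or.inr ⟨a, List.mem_cons_self, h⟩
          · exact Or.inr ⟨y, List.mem_cons_of_mem _ hy, hx⟩
        · rintro (h | ⟨y, hy, hx⟩)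
          · exact Or.inl (Or.inl h)
          · rcases List.mem_cons.1 hy with rfl | hy'
            · exact Or.inl (Or.inr hx)
            · exact Or.inr ⟨y, hy', hx⟩
  unfold pvImage
  rw [gen]
  simp [PySem.Set.empty]


-- a target hit anywhere in the neighbour list returns depth+1
theorem pvScanA_inl (target : String) (ns : List String) (h : target ∈ ns) :
    ∀ (V : PySem.Set String) (Q : List (String × Int)) (d : Int),
    pvScanA target V Q d ns = Sum.inl (d + 1) := by
  induction ns with
  | nil => simp at h
  | cons n ns ih =>
      intro V Q d
      by_cases hn : n = target
      · simp [pvScanA, hn]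
      · have h' : target ∈ ns := by
          rcases List.mem_cons.1 h with h1 | h1
          · exact absurd h1.symm hn
          · exact h1
        simp only [pvScanA, if_neg hn]
        split <;> exact ih h' _ _ _


-- no target hit: pvScanA is pvScanF, appending the fresh nodes tagged depth+1
theorem pvScanA_inr (target : String) (ns : List String) (h : target ∉ ns) :
    ∀ (V : PySem.Set String) (Qb : List (String × Int)) (acc : List String) (d : Int),
    pvScanA target V (Qb ++ acc.map (fun n => (n, d + 1))) d ns =
      Sum.inr ((pvScanF V acc ns).1, Qb ++ ((pvScanF V acc ns).2).map (fun n => (n, d + 1))) := by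
  induction ns with
  | nil => intro V Qb acc d; simp [pvScanA, pvScanF]
  | cons n ns ih =>
      intro V Qb acc d
      have hn : ¬ n = target := fun e => h (by simp [e])
      have h' : target ∉ ns := fun e => h (List.mem_cons_of_mem _ e)
      simp only [pvScanA, pvScanF, if_neg hn]
      by_cases hc : PySem.Set.contains V n = true
      · rw [if_pos hc, if_pos hc]; exact ih h' V Qb acc d
      · rw [if_neg hc, if_neg hc]
        have : (Qb ++ acc.map (fun n => (n, d + 1))) ++ [(n, d + 1)] =
            Qb ++ ((acc ++ [n]).map (fun n => (n, d + 1))) := by simp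
        rw [this]
        exact ih h' (PySem.Set.add V n) Qb (acc ++ [n]) d


-- all facts about one pvScanF pass
theorem pvScanF_facts (ns : List String) : ∀ (V : PySem.Set String) (acc : List String),
    ∃ new, (pvScanF V acc ns).2 = acc ++ new ∧
      (∀ x, x ∈ (pvScanF V acc ns).1 ↔ x ∈ V ∨ x ∈ new) ∧
      (∀ x ∈ new, x ∉ V ∧ x ∈ ns) ∧
      (∀ x ∈ ns, x ∈ (pvScanF V acc ns).1) ∧
      (∀ (U : List String), (∀ x ∈ ns, x ∈ U) →
        U.countP (fun x => !(decide (x ∈ (pvScanF V acc ns).1))) + new.length ≤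
          U.countP (fun x => !(decide (x ∈ V)))) := by
  induction ns with
  | nil =>
      intro V acc
      exact ⟨[], by simp [pvScanF], by simp [pvScanF], by simp, by simp, fun U _ => le_refl _⟩
  | cons n ns ih =>
      intro V acc
      by_cases hc : PySem.Set.contains V n = true
      · have hnV : n ∈ V := (PySem.Set.contains_iff V n).1 hc
        obtain ⟨new, h1, h2, h3, h4, h5⟩ := ih V acc
        have hE : pvScanF V acc (n :: ns) = pvScanF V acc ns := by
          rw [show pvScanF V acc (n :: ns) = if PySem.Set.contains V n then pvScanF V acc ns
            else pvScanF (PySem.Set.add V n) (acc ++ [n]) ns from rfl, if_pos hc]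
        rw [hE]
        refine ⟨new, ?_, ?_, ?_, ?_, ?_⟩
        · exact h1
        · exact h2
        · exact fun x hx => ⟨(h3 x hx).1, List.mem_cons_of_mem _ (h3 x hx).2⟩
        · intro x hx
          rcases List.mem_cons.1 hx with rfl | hx'
          · exact (h2 x).2 (Or.inl hnV)
          · exact h4 x hx'
        · exact fun U hU => h5 U (fun x hx => hU x (List.mem_cons_of_mem _ hx))
      · have hnV : n ∉ V := fun e => hc ((PySem.Set.contains_iff V n).2 e)
        obtain ⟨new, h1, h2, h3, h4, h5⟩ := ih (PySem.Set.add V n) (acc ++ [n])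
        have hE : pvScanF V acc (n :: ns) = pvScanF (PySem.Set.add V n) (acc ++ [n]) ns := by
          rw [show pvScanF V acc (n :: ns) = if PySem.Set.contains V n then pvScanF V acc ns
            else pvScanF (PySem.Set.add V n) (acc ++ [n]) ns from rfl, if_neg hc]
        rw [hE]
        refine ⟨n :: new, ?_, ?_, ?_, ?_, ?_⟩
        · rw [h1]; simp
        · intro x
          rw [h2 x, PySem.Set.mem_add]
          constructor
          · rintro ((hx | rfl) | hx)
            · exact Or.inl hx
            · exact Or.inr (List.mem_cons_self)
            · exact Or.inr (List.mem_cons_of_mem _ hx)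
          · rintro (hx | hx)
            · exact Or.inl (Or.inl hx)
            · rcases List.mem_cons.1 hx with rfl | hx'
              · exact Or.inl (Or.inr rfl)
              · exact Or.inr hx'
        · intro x hx
          rcases List.mem_cons.1 hx with rfl | hx'
          · exact ⟨hnV, List.mem_cons_self⟩
          · have := h3 x hx'
            refine ⟨fun e => this.1 ((PySem.Set.mem_add V n x).2 (Or.inl e)), List.mem_cons_of_mem _ this.2⟩
        · intro x hx
          rcases List.mem_cons.1 hx with rfl | hx'
          · exact (h2 x).2 (Or.inl ((PySem.Set.mem_add V x x).2 (Or.inr rfl)))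
          · exact h4 x hx'
        · intro U hU
          have hnU : n ∈ U := hU n (List.mem_cons_self)
          have hstep : U.countP (fun x => !(decide (x ∈ PySem.Set.add V n))) <
              U.countP (fun x => !(decide (x ∈ V))) := by
            apply pv_countP_lt U _ _ ?_ n hnU
            · simp [PySem.Set.mem_add]
            · simp [hnV]
            · intro a _ ha
              simp only [Bool.not_eq_true', decide_eq_false_iff_not, PySem.Set.mem_add] at ha ⊢
              exact fun e => ha (Or.inl e)
          have := h5 U (fun x hx => hU x (List.mem_cons_of_mem _ hx))
          simp only [List.length_cons]
          omega


-- all facts about one whole level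
theorem pvLvl_facts (graph : List (String × List String)) (F : List String) :
    ∀ (V : PySem.Set String) (acc : List String),
    ∃ new, (pvLvl graph (V, acc) F).2 = acc ++ new ∧
      (∀ x, x ∈ (pvLvl graph (V, acc) F).1 ↔ x ∈ V ∨ x ∈ new) ∧
      (∀ x ∈ new, x ∉ V ∧ ∃ c ∈ F, x ∈ pvNbrs graph c) ∧
      (∀ c ∈ F, ∀ x ∈ pvNbrs graph c, x ∈ (pvLvl graph (V, acc) F).1) ∧
      ((pvUniv graph).countP (fun x => !(decide (x ∈ (pvLvl graph (V, acc) F).1))) + new.length ≤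
          (pvUniv graph).countP (fun x => !(decide (x ∈ V)))) := by
  induction F with
  | nil =>
      intro V acc
      exact ⟨[], by simp [pvLvl], by simp [pvLvl], by simp, by simp, le_refl _⟩
  | cons c F ih =>
      intro V acc
      have hstep : pvLvl graph (V, acc) (c :: F) =
          pvLvl graph ((pvScanF V acc (pvNbrs graph c)).1, (pvScanF V acc (pvNbrs graph c)).2) F := by
        simp [pvLvl]
      obtain ⟨n1, s1, s2, s3, s4, s5⟩ := pvScanF_facts (pvNbrs graph c) V acc
      obtain ⟨n2, l1, l2, l3, l4, l5⟩ :=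
        ih (pvScanF V acc (pvNbrs graph c)).1 (pvScanF V acc (pvNbrs graph c)).2
      rw [hstep]
      refine ⟨n1 ++ n2, ?_, ?_, ?_, ?_, ?_⟩
      · rw [l1, s1, List.append_assoc]
      · intro x
        rw [l2 x, s2 x, List.mem_append]
        tauto
      · intro x hx
        rcases List.mem_append.1 hx with hx1 | hx2
        · obtain ⟨hnotV, hns⟩ := s3 x hx1
          exact ⟨hnotV, c, List.mem_cons_self, hns⟩
        · obtain ⟨hnotV1, hc2⟩ := l3 x hx2
          constructor
          · intro hxV; exact hnotV1 ((s2 x).2 (Or.inl hxV))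
          · obtain ⟨c', hc', hn'⟩ := hc2
            exact ⟨c', List.mem_cons_of_mem _ hc', hn'⟩
      · intro c' hc' x hx
        rcases List.mem_cons.1 hc' with rfl | hc''
        · exact (l2 x).2 (Or.inl (s4 x hx))
        · exact l4 c' hc'' x hx
      · have h5 := s5 (pvUniv graph) (fun x hx => pvNbrs_subset graph c x hx)
        simp only [List.length_append]
        omega


-- A runs one whole level: either the target occurs among its neighbours (value depth+1),
-- or A continues behind the level with the folded state
theorem pvLevelA (graph : List (String × List String)) (target : String) (d : Int) :
    ∀ (F : List String) (V : PySem.Set String) (G : List String) (fA : Nat),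
    pvGoA graph target (F.length + fA) V
        (F.map (fun n => (n, d)) ++ G.map (fun n => (n, d + 1))) =
      if F.any (fun c => decide (target ∈ pvNbrs graph c)) then d + 1
      else pvGoA graph target fA (pvLvl graph (V, G) F).1
            (((pvLvl graph (V, G) F).2).map (fun n => (n, d + 1))) := by
  intro F
  induction F with
  | nil => intro V G fA; simp [pvLvl]
  | cons c F ih =>
      intro V G fA
      have hlen : (c :: F).length + fA = Nat.succ (F.length + fA) := by simp; omega
      rw [hlen]
      simp only [List.map_cons, List.cons_append]
      rw [show pvGoA graph target (Nat.succ (F.length + fA)) V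
          ((c, d) :: (F.map (fun n => (n, d)) ++ G.map (fun n => (n, d + 1)))) =
          match pvScanA target V (F.map (fun n => (n, d)) ++ G.map (fun n => (n, d + 1))) d
              (pvNbrs graph c) with
          | Sum.inl d' => d'
          | Sum.inr (v, q) => pvGoA graph target (F.length + fA) v q from rfl]
      by_cases ht : target ∈ pvNbrs graph c
      · rw [pvScanA_inl target _ ht]
        have : (c :: F).any (fun c => decide (target ∈ pvNbrs graph c)) = true := by
          simp [ht]
        rw [if_pos this]
      · rw [pvScanA_inr target _ ht V (F.map (fun n => (n, d))) G d]
        have hstep : pvLvl graph (V, G) (c :: F) =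
            pvLvl graph ((pvScanF V G (pvNbrs graph c)).1, (pvScanF V G (pvNbrs graph c)).2) F := by
          simp [pvLvl, pvNbrs]
        rw [hstep]
        have hany : (c :: F).any (fun c => decide (target ∈ pvNbrs graph c)) =
            F.any (fun c => decide (target ∈ pvNbrs graph c)) := by
          simp [ht]
        rw [hany]
        exact ih (pvScanF V G (pvNbrs graph c)).1 (pvScanF V G (pvNbrs graph c)).2 fA


-- the simulation: A at a level boundary computes what B computes
theorem pvMain (graph : List (String × List String)) (target : String) :
    ∀ (fB : Nat) (R V : PySem.Set String) (F : List String) (d : Int) (fA : Nat),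
    target ∉ R →
    (∀ x, x ∈ V ↔ x ∈ R) →
    (∀ c ∈ F, c ∈ R) →
    (∀ y ∈ R, ∀ x ∈ pvNbrs graph y, x ∈ R ∨ ∃ c ∈ F, x ∈ pvNbrs graph c) →
    (∀ x ∈ R, x ∈ pvUniv graph) →
    (pvUniv graph).countP (fun x => !(decide (x ∈ V))) + F.length ≤ fA →
    (pvUniv graph).countP (fun x => !(decide (x ∈ R))) + 1 ≤ fB →
    pvGoA graph target fA V (F.map (fun n => (n, d))) = pvGoB graph target fB R d := by
  intro fB
  induction fB with
  | zero =>
      intro R V F d fA _ _ _ _ _ _ hB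
      omega
  | succ fB ih =>
      intro R V F d fA htR hVR hFR hN hRU hA hB
      -- target not in the image of R unless it is a neighbour of the frontier
      have himg_cases : ∀ x, x ∈ pvImage graph R → x ∈ R ∨ ∃ c ∈ F, x ∈ pvNbrs graph c := by
        intro x hx
        obtain ⟨y, hy, hxy⟩ := (pvImage_mem graph R x).1 hx
        exact hN y hy x hxy
      have hBdef : pvGoB graph target (Nat.succ fB) R d =
          (if target ∈ pvImage graph R then d + 1
           else if PySem.Set.issubset (pvImage graph R) R then (-1 : Int)
           else pvGoB graph target fB (PySem.Set.union R (pvImage graph R)) (d + 1)) := rfl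
      cases F with
      | nil =>
          -- A: empty queue → -1.  B: image ⊆ R (nothing frontier-new), target not in it → -1
          have himg : ∀ x, x ∈ pvImage graph R → x ∈ R := by
            intro x hx
            rcases himg_cases x hx with h | ⟨c, hc, _⟩
            · exact h
            · simp at hc
          have ht : target ∉ pvImage graph R := fun h => htR (himg _ h)
          have hsub : PySem.Set.issubset (pvImage graph R) R = true :=
            (PySem.Set.issubset_iff _ _).2 himg
          rw [hBdef, if_neg ht, if_pos hsub]
          simp [pvGoA]
      | cons c F' =>
          obtain ⟨fA', rfl⟩ : ∃ fA', fA = (c :: F').length + fA' :=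
            ⟨fA - (c :: F').length, by simp at hA ⊢; omega⟩
          have hlevel := pvLevelA graph target d (c :: F') V [] fA'
          simp only [List.map_nil, List.append_nil] at hlevel
          rw [hlevel]
          obtain ⟨new, l1, l2, l3, l4, l5⟩ := pvLvl_facts graph (c :: F') V []
          simp only [List.nil_append] at l1
          by_cases hany : (c :: F').any (fun c => decide (target ∈ pvNbrs graph c)) = true
          · -- both return d+1
            rw [if_pos hany]
            obtain ⟨c0, hc0, ht0⟩ := List.any_eq_true.1 hany
            have : target ∈ pvImage graph R :=
              (pvImage_mem graph R target).2 ⟨c0, hFR c0 hc0, of_decide_eq_true ht0⟩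
            rw [hBdef, if_pos this]
          · rw [if_neg hany]
            have hnoF : ∀ c0 ∈ c :: F', target ∉ pvNbrs graph c0 := by
              intro c0 hc0 ht0
              exact hany (List.any_eq_true.2 ⟨c0, hc0, decide_eq_true ht0⟩)
            have ht : target ∉ pvImage graph R := by
              intro h
              rcases himg_cases target h with h' | ⟨c0, hc0, ht0⟩
              · exact htR h'
              · exact hnoF c0 hc0 ht0
            rw [hBdef, if_neg ht]
            cases hne : new with
            | nil =>
                -- level added nothing: image ⊆ R, both -1
                subst hne
                have hVsame : ∀ x, x ∈ (pvLvl graph (V, []) (c :: F')).1 ↔ x ∈ V := by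
                  intro x; rw [l2 x]; simp
                have himg : ∀ x, x ∈ pvImage graph R → x ∈ R := by
                  intro x hx
                  rcases himg_cases x hx with h | ⟨c0, hc0, hx0⟩
                  · exact h
                  · exact (hVR x).1 ((hVsame x).1 (l4 c0 hc0 x hx0))
                have hsub : PySem.Set.issubset (pvImage graph R) R = true :=
                  (PySem.Set.issubset_iff _ _).2 himg
                rw [if_pos hsub, l1]
                simp [pvGoA]
            | cons n0 rest0 =>
                -- level found fresh nodes: B recurses, A continues at the next level
                have hn0 : n0 ∈ new := by rw [hne]; exact List.mem_cons_self
                have hn0F := l3 n0 hn0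
                have hn0img : n0 ∈ pvImage graph R := by
                  obtain ⟨c0, hc0, hx0⟩ := hn0F.2
                  exact (pvImage_mem graph R n0).2 ⟨c0, hFR c0 hc0, hx0⟩
                have hn0R : n0 ∉ R := fun h => hn0F.1 ((hVR n0).2 h)
                have hsub : PySem.Set.issubset (pvImage graph R) R = false := by
                  rcases h : PySem.Set.issubset (pvImage graph R) R with _ | _
                  · rfl
                  · exact absurd ((PySem.Set.issubset_iff _ _).1 h n0 hn0img) hn0R
                rw [if_neg (by simp [hsub]), l1]
                -- the new-membership helpers
                have hnew_img : ∀ x ∈ new, x ∈ pvImage graph R := by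
                  intro x hx
                  obtain ⟨c0, hc0, hx0⟩ := (l3 x hx).2
                  exact (pvImage_mem graph R x).2 ⟨c0, hFR c0 hc0, hx0⟩
                set R' := PySem.Set.union R (pvImage graph R) with hR'
                have hmemR' : ∀ x, x ∈ R' ↔ x ∈ R ∨ x ∈ pvImage graph R := by
                  intro x; exact PySem.Set.mem_union R (pvImage graph R) x
                apply ih R' (pvLvl graph (V, []) (c :: F')).1 new (d + 1)
                -- target ∉ R'
                · intro h
                  rcases (hmemR' target).1 h with h' | h'
                  · exact htR h'
                  · exact ht h'
                -- V' = R'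
                · intro x
                  rw [l2 x, hmemR' x]
                  constructor
                  · rintro (hx | hx)
                    · exact Or.inl ((hVR x).1 hx)
                    · exact Or.inr (hnew_img x hx)
                  · rintro (hx | hx)
                    · exact Or.inl ((hVR x).2 hx)
                    · rcases himg_cases x hx with h' | ⟨c0, hc0, hx0⟩
                      · exact Or.inl ((hVR x).2 h')
                      · exact (l2 x).1 (l4 c0 hc0 x hx0)
                -- new ⊆ R'
                · intro x hx
                  exact (hmemR' x).2 (Or.inr (hnew_img x hx))
                -- neighbour closure for R'
                · intro y hy x hxy
                  rcases (hmemR' y).1 hy with hyR | hyI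
                  · exact Or.inl ((hmemR' x).2 (Or.inr ((pvImage_mem graph R x).2 ⟨y, hyR, hxy⟩)))
                  · rcases himg_cases y hyI with hyR | ⟨c0, hc0, hy0⟩
                    · exact Or.inl ((hmemR' x).2 (Or.inr ((pvImage_mem graph R x).2 ⟨y, hyR, hxy⟩)))
                    · have hyV' : y ∈ (pvLvl graph (V, []) (c :: F')).1 := l4 c0 hc0 y hy0
                      rcases (l2 y).1 hyV' with hyV | hyNew
                      · exact Or.inl ((hmemR' x).2 (Or.inr
                          ((pvImage_mem graph R x).2 ⟨y, (hVR y).1 hyV, hxy⟩)))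
                      · exact Or.inr ⟨y, hyNew, hxy⟩
                -- R' ⊆ universe
                · intro x hx
                  rcases (hmemR' x).1 hx with h' | h'
                  · exact hRU x h'
                  · obtain ⟨y, _, hxy⟩ := (pvImage_mem graph R x).1 h'
                    exact pvNbrs_subset graph y x hxy
                -- fuel A
                · have := l5
                  simp at hA
                  omega
                -- fuel B
                · have hmono : ∀ a ∈ pvUniv graph,
                      (fun x => !(decide (x ∈ R'))) a = true → (fun x => !(decide (x ∈ R))) a = true := by
                    intro a _ h
                    simp only [Bool.not_eq_true', decide_eq_false_iff_not] at h ⊢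
                    exact fun e => h ((hmemR' a).2 (Or.inl e))
                  have hlt : (pvUniv graph).countP (fun x => !(decide (x ∈ R'))) <
                      (pvUniv graph).countP (fun x => !(decide (x ∈ R))) := by
                    apply pv_countP_lt _ _ _ hmono n0
                    · rcases hn0F.2 with ⟨c0, _, hx0⟩
                      exact pvNbrs_subset graph c0 n0 hx0
                    · simp [(hmemR' n0).2 (Or.inr hn0img)]
                    · simp [hn0R]
                  omega


-- ===== VERDICT (by name: the statement is the Claim_ definition above) =====
theorem trust_depth_py_spec : Claim_equal_trust_depth_py := by
  intro graph target _
  unfold Spec_trust_depth_py trust_depth_py trust_depth_py_alt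
  split_ifs with h
  · rfl
  · have hset : PySem.Set.ofList ["snowdrop-core"] = (["snowdrop-core"] : List String) := rfl
    have hrootU : "snowdrop-core" ∈ pvUniv graph := List.mem_cons_self
    have hcount : (pvUniv graph).countP
        (fun x => !(decide (x ∈ (["snowdrop-core"] : List String)))) + 1 ≤ pvFuel graph := by
      rw [pvFuel_eq]
      have := pv_countP_lt (pvUniv graph)
        (fun x => !(decide (x ∈ (["snowdrop-core"] : List String)))) (fun _ => true)
        (by intro a _ _; rfl) "snowdrop-core" hrootU (by simp) rfl
      rw [List.countP_true] at this
      omega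
    have := pvMain graph target (pvFuel graph) (PySem.Set.ofList ["snowdrop-core"])
        (PySem.Set.ofList ["snowdrop-core"]) ["snowdrop-core"] 0 (pvFuel graph)
        (by rw [hset]; simp [h])
        (fun x => Iff.rfl)
        (by intro c hc; rw [hset]; exact hc)
        (by
          intro y hy x hxy
          rw [hset] at hy
          simp only [List.mem_singleton] at hy
          subst hy
          exact Or.inr ⟨"snowdrop-core", List.mem_cons_self, hxy⟩)
        (by intro x hx; rw [hset] at hx; simp only [List.mem_singleton] at hx; subst hx; exact hrootU)
        (by rw [hset]; simpa using hcount)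
        (by rw [hset]; exact hcount)
    simpa using this
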